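-- pv_equiv track=rewrite | github.com/hrappuccino/atcoder | python/abc098_c-attention.py | f
-- ===== SOURCE A (Python) =====
-- def f(S):
--   count = S.count('E')
--   for s in S:
--     if s == 'E':
--       count += -1
--     yield count
--     if s == 'W':
--       count += 1
-- ===== SOURCE B (Python) =====
-- def f(S):
--     n = len(S)
--     # suffix table: sufE[i] = number of 'E' strictly after index i
--     sufE = []
--     acc = 0
--     for ch in reversed(S):
--         sufE.append(acc)
--         if ch == 'E':
--             acc += 1
--     sufE.reverse()
--     leftW = 0
--     for i in range(n):
--         yield leftW + sufE[i]
--         if S[i] == 'W':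
--             leftW += 1
-- ===== Notes on version B (the rewrite author's own statement) =====
-- stated objective: alternative
-- what changed: A keeps one running counter initialised with a full count pre-scan and adjusts it before/after each yield; B precomputes an explicit suffix table of east-counts in a backward pass and then yields leftW + sufE[i] in a forward pass with a separate west counter.
import Mathlib
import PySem

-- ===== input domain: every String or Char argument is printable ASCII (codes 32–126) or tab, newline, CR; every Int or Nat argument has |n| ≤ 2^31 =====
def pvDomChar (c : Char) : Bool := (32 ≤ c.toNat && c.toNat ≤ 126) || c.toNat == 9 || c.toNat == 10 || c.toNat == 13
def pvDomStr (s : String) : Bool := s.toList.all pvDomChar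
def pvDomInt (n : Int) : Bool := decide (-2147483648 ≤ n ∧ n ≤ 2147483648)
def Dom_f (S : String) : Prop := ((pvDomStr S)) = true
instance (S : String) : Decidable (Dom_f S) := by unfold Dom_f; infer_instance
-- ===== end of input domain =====

-- B replaces A's single adjusted running counter (seeded by a full count pre-scan)
-- with an explicit backward-built suffix table of east-counts plus a forward west counter;
-- same O(n) cost, different decomposition.

-- ===== PORT A =====
-- the generator loop: yields the adjusted count for each character
def fA_loop (count : Int) : List Char → List Int
  | [] => []
  | c :: cs =>
    let c1 := if c = 'E' then count + (-1) else count
    c1 :: fA_loop (if c = 'W' then c1 + 1 else c1) cs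

def f (S : String) : List Int := fA_loop ((PySem.Str.count S "E" : Int)) S.toList

-- ===== PORT B =====
-- backward pass over reversed(S): returns (sufE table, running acc of 'E's seen)
def fB_suf : List Char → List Int × Int
  | [] => ([], 0)
  | c :: cs =>
    let p := fB_suf cs
    (p.2 :: p.1, if c = 'E' then p.2 + 1 else p.2)

-- forward pass: yield leftW + sufE[i], then bump leftW on 'W'
def fB_out (leftW : Int) : List Char → List Int → List Int
  | [], _ => []
  | _ :: _, [] => []
  | c :: cs, e :: es => (leftW + e) :: fB_out (if c = 'W' then leftW + 1 else leftW) cs es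

def f_alt (S : String) : List Int := fB_out 0 S.toList (fB_suf S.toList).1

-- ===== PRECONDITION & SPEC =====
def Spec_f (S : String) (out : List Int) : Prop := out = f_alt S
instance (S : String) (out : List Int) : Decidable (Spec_f S out) := by unfold Spec_f; infer_instance

-- ===== CLAIM (what is proved, stated in full; the proofs are below) =====
def Claim_equal_f : Prop := ∀ (S : String), Dom_f S → Spec_f S (f S)

-- ===== LEMMAS AND PROOFS =====

-- S.count('E') counts the occurrences of the single character 'E'
theorem countGo_singleton (l : List Char) : ∀ (fuel acc : Nat), l.length ≤ fuel →
    PySem.Chars.count.go ['E'] fuel l acc = acc + l.count 'E' := by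
  induction l with
  | nil => intro fuel acc _; cases fuel <;> simp [PySem.Chars.count.go]
  | cons c cs ih =>
    intro fuel acc h
    cases fuel with
    | zero => simp at h
    | succ n =>
      simp only [PySem.Chars.count.go]
      by_cases hc : c = 'E'
      · subst hc
        simp only [List.isPrefixOf, List.count_cons]
        rw [if_pos (by simp)]
        simp only [List.length_cons] at h
        rw [show (['E'] : List Char).length = 1 from rfl, List.drop_one, List.tail_cons,
          ih n (acc + 1) (by omega)]
        simp; omega
      · simp only [List.isPrefixOf]
        rw [if_neg (by simp [Ne.symm hc])]
        simp only [List.length_cons] at h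
        rw [ih n acc (by omega)]
        simp [hc]

theorem count_E_eq (cs : List Char) : PySem.Chars.count cs ['E'] = cs.count 'E' := by
  simp [PySem.Chars.count, countGo_singleton cs cs.length 0 le_rfl]

theorem fB_suf_snd (cs : List Char) : (fB_suf cs).2 = (cs.count 'E' : Int) := by
  induction cs with
  | nil => rfl
  | cons c cs ih =>
    simp only [fB_suf, List.count_cons, ih]
    by_cases hc : c = 'E' <;> simp [hc]

theorem key (cs : List Char) : ∀ (lw : Int),
    fA_loop (lw + (fB_suf cs).2) cs = fB_out lw cs (fB_suf cs).1 := by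
  induction cs with
  | nil => intro lw; rfl
  | cons c cs ih =>
    intro lw
    simp only [fB_suf, fA_loop, fB_out]
    by_cases hc : c = 'E'
    · have hw : c ≠ 'W' := by subst hc; decide
      simp only [hc, if_true, if_neg (by subst hc; decide : ¬ ('E' = 'W'))]
      refine congrArg₂ List.cons (by ring) ?_
      rw [show lw + ((fB_suf cs).2 + 1) + -1 = lw + (fB_suf cs).2 by ring]
      exact ih lw
    · simp only [hc, if_false]
      by_cases hw : c = 'W'
      · simp only [hw, if_true]
        refine congrArg₂ List.cons rfl ?_
        rw [show lw + (fB_suf cs).2 + 1 = lw + 1 + (fB_suf cs).2 by ring]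
        exact ih (lw + 1)
      · simp only [hw, if_false]
        exact congrArg₂ List.cons rfl (ih lw)

-- ===== VERDICT (by name: the statement is the Claim_ definition above) =====
theorem f_spec : Claim_equal_f := by
  intro S _
  unfold Spec_f f f_alt
  rw [show (PySem.Str.count S "E" : Int) = 0 + (fB_suf S.toList).2 by
        rw [fB_suf_snd, PySem.Str.count_eq, show "E".toList = ['E'] from rfl, count_E_eq]; ring]
  exact key S.toList 0
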